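-- pv_equiv track=rewrite | github.com/BuiTuanAnh0z/24174600087_Bui_Tuan_Anh_bai_tap | baitap/bai_tap_3.py | kiem_tra_so_thuc
-- ===== SOURCE A (Python) =====
-- def kiem_tra_so_thuc(chuoi):
--     """
--     Hàm kiểm tra chuỗi có phải số thực hay không.
--     Tham số:
--         chuoi (str): Chuỗi cần kiểm tra.
--     Trả về:
--         bool: True nếu chuỗi là số thực, False nếu không.
--     """
--     if not chuoi:  # Kiểm tra chuỗi rỗng
--         return False
--     co_dau_cham = False  # Biến đánh dấu sự xuất hiện của dấu '.'
--     # Nếu chuỗi bắt đầu bằng dấu âm, bỏ qua ký tự đầu tiên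
--     if chuoi[0] == '-':
--         chuoi = chuoi[1:]
--     # Duyệt từng ký tự trong chuỗi
--     for ky_tu in chuoi:
--         if ky_tu == '.':  # Gặp dấu chấm thập phân
--             if co_dau_cham:  # Nếu đã gặp dấu '.' trước đó, không phải số thực
--                 return False
--             co_dau_cham = True
--         elif not ('0' <= ky_tu <= '9'):  # Ký tự không phải số và không phải '.'
--             return False
--     # Đảm bảo chuỗi không chỉ là dấu '.' hoặc rỗng
--     return co_dau_cham and len(chuoi) > 1
-- ===== SOURCE B (Python) =====
-- def kiem_tra_so_thuc(chuoi):
--     s = chuoi[1:] if chuoi.startswith('-') else chuoi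
--     parts = s.split('.')
--     return len(parts) == 2 and len(s) > 1 and all('0' <= c <= '9' for p in parts for c in p)
-- ===== Notes on version B (the rewrite author's own statement) =====
-- stated objective: idiomatic
-- what changed: Replaces A's stateful single-pass scan with a dot-seen flag by a partition-then-validate shape: strip an optional leading '-', split on '.', require exactly two parts and length > 1, and check every character of both parts is an ASCII digit.
import Mathlib
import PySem

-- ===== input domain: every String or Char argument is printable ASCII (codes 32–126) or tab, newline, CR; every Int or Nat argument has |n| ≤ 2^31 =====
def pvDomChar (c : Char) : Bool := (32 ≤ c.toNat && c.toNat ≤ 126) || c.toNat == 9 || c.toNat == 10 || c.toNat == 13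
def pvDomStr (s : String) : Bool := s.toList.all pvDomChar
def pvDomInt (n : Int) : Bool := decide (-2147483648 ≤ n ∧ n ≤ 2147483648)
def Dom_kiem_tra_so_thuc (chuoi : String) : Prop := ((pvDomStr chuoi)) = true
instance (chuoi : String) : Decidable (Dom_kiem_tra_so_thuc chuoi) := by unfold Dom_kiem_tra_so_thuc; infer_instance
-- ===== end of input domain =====

-- B replaces A's stateful one-pass dot-flag scan by split-on-'.'-then-validate (objective: idiomatic decomposition; same cost).

-- digit test '0' <= c <= '9', shared by both ports (it is the same character comparison in both Pythons)
def pvDigit (c : Char) : Bool := decide ('0' ≤ c) && decide (c ≤ '9')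

-- ===== PORT A =====
-- the for-loop of A: `some flag` = loop finished with that dot-flag, `none` = early `return False`
def pvALoop : List Char → Bool → Option Bool
  | [], flag => some flag
  | c :: cs, flag =>
    if c = '.' then
      if flag then none else pvALoop cs true
    else if pvDigit c then pvALoop cs flag
    else none

def kiem_tra_so_thuc (chuoi : String) : Bool :=
  let l := chuoi.toList
  if l.isEmpty then false
  else
    let s := if l.head? = some '-' then l.tail else l
    match pvALoop s false with
    | none => false
    | some flag => flag && decide (s.length > 1)

-- ===== PORT B =====
def kiem_tra_so_thuc_alt (chuoi : String) : Bool :=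
  let l := chuoi.toList
  let s := if l.head? = some '-' then l.tail else l
  let parts := s.splitOn '.'
  decide (parts.length = 2) && (decide (s.length > 1) && parts.all (fun p => p.all pvDigit))

-- ===== PRECONDITION & SPEC =====
def Spec_kiem_tra_so_thuc (chuoi : String) (out : Bool) : Prop := out = kiem_tra_so_thuc_alt chuoi
instance (chuoi : String) (out : Bool) : Decidable (Spec_kiem_tra_so_thuc chuoi out) := by unfold Spec_kiem_tra_so_thuc; infer_instance

-- ===== CLAIM (what is proved, stated in full; the proofs are below) =====
def Claim_equal_kiem_tra_so_thuc : Prop := ∀ (chuoi : String), Dom_kiem_tra_so_thuc chuoi → Spec_kiem_tra_so_thuc chuoi (kiem_tra_so_thuc chuoi)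

-- ===== LEMMAS AND PROOFS =====

-- with the flag already set, A's loop succeeds (with flag true) iff the rest is all digits
theorem pvALoop_true (cs : List Char) :
    pvALoop cs true = if cs.all pvDigit then some true else none := by
  induction cs with
  | nil => rfl
  | cons c cs ih =>
    by_cases hc : c = '.'
    · subst hc; simp [pvALoop, pvDigit]
    · cases hd : pvDigit c <;> simp [pvALoop, hc, hd, ih]

-- a dot-free all-digit segment versus a 1-part split
theorem pvSplit_one (cs : List Char) :
    (decide ((cs.splitOn '.').length = 1) && (cs.splitOn '.').all (fun p => p.all pvDigit))
      = cs.all pvDigit := by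
  induction cs with
  | nil => rfl
  | cons c cs ih =>
    by_cases hc : c = '.'
    · subst hc
      have hne := List.splitOnP_ne_nil (fun x => x == '.') cs
      simp [List.splitOn, List.splitOnP_cons, pvDigit]
      intro hh
      exact absurd hh hne
    · obtain ⟨h, t, hht⟩ := List.exists_cons_of_ne_nil (List.splitOnP_ne_nil (fun x => x == '.') cs)
      simp only [List.splitOn] at ih ⊢
      simp only [List.splitOnP_cons, beq_iff_eq, hc, if_false, hht, List.modifyHead_cons,
        List.all_cons, List.length_cons] at ih ⊢
      rw [← ih]
      cases hd : pvDigit c <;> cases hl : decide (t.length + 1 = 1) <;>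
        cases hh : h.all pvDigit <;> cases ht : t.all (fun p => p.all pvDigit) <;>
        simp [hd, hl, hh, ht]

-- A's loop from a clear flag versus B's 2-part split
theorem pvMain (cs : List Char) :
    (match pvALoop cs false with | none => false | some f => f)
      = (decide ((cs.splitOn '.').length = 2) && (cs.splitOn '.').all (fun p => p.all pvDigit)) := by
  induction cs with
  | nil => rfl
  | cons c cs ih =>
    by_cases hc : c = '.'
    · subst hc
      simp only [pvALoop, if_pos rfl, Bool.false_eq_true, if_false, pvALoop_true,
        List.splitOn, List.splitOnP_cons, beq_self_eq_true, if_pos rfl,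
        List.length_cons, List.all_cons, List.all_nil]
      have := pvSplit_one cs
      simp only [List.splitOn] at this
      cases h : (cs.splitOnP (fun x => x == '.')).all (fun p => p.all pvDigit) <;>
        cases ha : cs.all pvDigit <;> simp [h, ha] at this ⊢ <;> omega
    · obtain ⟨h, t, hht⟩ := List.exists_cons_of_ne_nil (List.splitOnP_ne_nil (fun x => x == '.') cs)
      simp only [List.splitOn] at ih hht ⊢
      simp only [List.splitOnP_cons]
      simp only [hc, beq_iff_eq, if_false, hht, List.modifyHead_cons, List.all_cons,
        List.length_cons] at ih ⊢
      simp only [pvALoop, hc, if_false]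
      cases hd : pvDigit c
      · simp [hd]
      · simp [hd, ih]

-- combine pvMain with the trailing `and len(chuoi) > 1`
theorem pvFull (s : List Char) :
    (match pvALoop s false with | none => false | some flag => flag && decide (s.length > 1))
      = (decide ((s.splitOn '.').length = 2) &&
          (decide (s.length > 1) && (s.splitOn '.').all (fun p => p.all pvDigit))) := by
  have h := pvMain s
  cases hres : pvALoop s false with
  | none =>
    rw [hres] at h; simp only at h ⊢
    cases h2 : decide (s.length > 1) <;>
      cases h1 : decide ((s.splitOn '.').length = 2) <;>
      cases h3 : (s.splitOn '.').all (fun p => p.all pvDigit) <;>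
      simp [h1, h2, h3] at h ⊢
  | some f =>
    rw [hres] at h; simp only at h ⊢
    rw [h]
    cases h2 : decide (s.length > 1) <;>
      cases h1 : decide ((s.splitOn '.').length = 2) <;>
      cases h3 : (s.splitOn '.').all (fun p => p.all pvDigit) <;>
      simp [h1, h2, h3]

-- ===== VERDICT (by name: the statement is the Claim_ definition above) =====
theorem kiem_tra_so_thuc_spec : Claim_equal_kiem_tra_so_thuc := by
  intro chuoi _
  unfold Spec_kiem_tra_so_thuc kiem_tra_so_thuc kiem_tra_so_thuc_alt
  cases hl : chuoi.toList with
  | nil => simp [List.splitOn, List.splitOnP_nil]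
  | cons c cs =>
    simp only [List.isEmpty_cons, Bool.false_eq_true, if_false]
    exact pvFull _
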